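-- pv_equiv track=rewrite | github.com/joshuarocksolid/ChoreBoyCodeStudio | app/editors/completion_popup/completion_item_model.py | compute_match_ranges
-- ===== SOURCE A (Python) =====
-- def compute_match_ranges(label: str, prefix: str) -> list[tuple[int, int]]:
--     """Return ``(start, length)`` ranges within ``label`` that match ``prefix``.
--
--     Two strategies, in order:
--
--     1. Case-insensitive prefix match -> single contiguous range from index 0.
--     2. Case-insensitive subsequence match -> one range per matched character.
--
--     Returns an empty list when no match is found.
--     """
--
--     if not prefix:
--         return []
--     if not label:
--         return []
--
--     lower_label = label.lower()
--     lower_prefix = prefix.lower()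
--
--     if lower_label.startswith(lower_prefix):
--         return [(0, len(prefix))]
--
--     ranges: list[tuple[int, int]] = []
--     label_index = 0
--     for ch in lower_prefix:
--         found = lower_label.find(ch, label_index)
--         if found == -1:
--             return []
--         if ranges and ranges[-1][0] + ranges[-1][1] == found:
--             start, length = ranges[-1]
--             ranges[-1] = (start, length + 1)
--         else:
--             ranges.append((found, 1))
--         label_index = found + 1
--     return ranges
-- ===== SOURCE B (Python) =====
-- def compute_match_ranges(label: str, prefix: str) -> list[tuple[int, int]]:
--     """Single left-to-right walk over the label with a pointer into the
--     prefix and a run-length accumulator; no str.find, no startswith."""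
--     if not prefix or not label:
--         return []
--     lp = prefix.lower()
--     ranges: list[tuple[int, int]] = []
--     j = 0
--     start = 0
--     run = 0
--     for i, ch in enumerate(label.lower()):
--         if j < len(lp) and ch == lp[j]:
--             if run == 0:
--                 start = i
--             run += 1
--             j += 1
--         else:
--             if run:
--                 ranges.append((start, run))
--             run = 0
--     if j < len(lp):
--         return []
--     if run:
--         ranges.append((start, run))
--     return ranges
-- ===== Notes on version B (the rewrite author's own statement) =====
-- stated objective: alternative
-- what changed: A loops over the prefix characters calling str.find on the label (with a startswith fast path); B drops both and walks the label once, character by character, with a pointer into the prefix and a run-length accumulator that emits a range whenever a run of consecutive hits ends.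
import Mathlib
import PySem

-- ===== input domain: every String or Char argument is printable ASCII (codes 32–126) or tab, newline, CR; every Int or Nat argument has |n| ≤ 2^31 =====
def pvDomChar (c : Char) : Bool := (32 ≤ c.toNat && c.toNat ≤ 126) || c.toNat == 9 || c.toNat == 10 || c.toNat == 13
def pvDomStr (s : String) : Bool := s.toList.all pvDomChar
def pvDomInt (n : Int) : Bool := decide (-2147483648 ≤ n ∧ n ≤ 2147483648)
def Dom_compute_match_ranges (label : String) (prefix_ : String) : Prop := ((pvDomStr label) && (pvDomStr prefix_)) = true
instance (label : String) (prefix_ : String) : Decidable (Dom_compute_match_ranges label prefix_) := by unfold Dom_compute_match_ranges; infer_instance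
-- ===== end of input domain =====

-- B replaces A's per-prefix-character str.find loop (and its startswith fast path) by a
-- single left-to-right walk over the label with a pointer into the prefix and a
-- run-length accumulator (objective: alternative traversal, same cost).


-- ===== PORT A =====
-- the 'for ch in lower_prefix' loop with state (ranges, label_index); ranges[-1] on a
-- nonempty list is getLast?, the in-place update of it is dropLast ++ [updated]
def loopA : List Char → List Char → List (Int × Int) → Int → List (Int × Int)
  | [], _, ranges, _ => ranges
  | ch :: rest, lower_label, ranges, label_index =>
      let found := PySem.Chars.findFrom lower_label [ch] label_index
      if found = -1 then []
      else
        let ranges' :=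
          match ranges.getLast? with
          | some (start, length) =>
              if start + length = found then ranges.dropLast ++ [(start, length + 1)]
              else ranges ++ [(found, 1)]
          | none => ranges ++ [(found, 1)]
        loopA rest lower_label ranges' (found + 1)

def compute_match_ranges (label : String) (prefix_ : String) : List (Int × Int) :=
  if prefix_.toList = [] then []
  else if label.toList = [] then []
  else
    if PySem.Chars.startswith (PySem.Chars.lower label.toList) (PySem.Chars.lower prefix_.toList) then
      [(0, (prefix_.toList.length : Int))]
    else
      loopA (PySem.Chars.lower prefix_.toList) (PySem.Chars.lower label.toList) [] 0

-- ===== PORT B =====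
-- the 'for i, ch in enumerate(label.lower())' loop; state = (remaining prefix chars
-- lp[j:], ranges, start, run); i is the running label index
def loopB : List Char → Int → List Char → List (Int × Int) → Int → Int →
    List Char × List (Int × Int) × Int × Int
  | [], _, lpr, ranges, start, run => (lpr, ranges, start, run)
  | ch :: rest, i, lpr, ranges, start, run =>
      match lpr with
      | c :: lpr' =>
          if ch = c then
            loopB rest (i + 1) lpr' ranges (if run = 0 then i else start) (run + 1)
          else if run ≠ 0 then loopB rest (i + 1) (c :: lpr') (ranges ++ [(start, run)]) start 0
          else loopB rest (i + 1) (c :: lpr') ranges start 0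
      | [] =>
          if run ≠ 0 then loopB rest (i + 1) [] (ranges ++ [(start, run)]) start 0
          else loopB rest (i + 1) [] ranges start 0

-- the code after the loop: 'if j < len(lp): return []' then flush the last run
def finB : List Char × List (Int × Int) × Int × Int → List (Int × Int)
  | (lpr, ranges, start, run) =>
      if lpr ≠ [] then []
      else if run ≠ 0 then ranges ++ [(start, run)] else ranges

def compute_match_ranges_alt (label : String) (prefix_ : String) : List (Int × Int) :=
  if prefix_.toList = [] ∨ label.toList = [] then []
  else finB (loopB (PySem.Chars.lower label.toList) 0 (PySem.Chars.lower prefix_.toList) [] 0 0)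

-- ===== PRECONDITION & SPEC =====
def Spec_compute_match_ranges (label : String) (prefix_ : String) (out : List (Int × Int)) : Prop := out = compute_match_ranges_alt label prefix_
instance (label : String) (prefix_ : String) (out : List (Int × Int)) : Decidable (Spec_compute_match_ranges label prefix_ out) := by unfold Spec_compute_match_ranges; infer_instance

-- ===== CLAIM (what is proved, stated in full; the proofs are below) =====
def Claim_equal_compute_match_ranges : Prop := ∀ (label : String) (prefix_ : String), Dom_compute_match_ranges label prefix_ → Spec_compute_match_ranges label prefix_ (compute_match_ranges label prefix_)

-- ===== LEMMAS AND PROOFS =====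

-- proof-side view: the greedy matched positions, and coalescing them into ranges
def scanB : List Char → List Char → Int → Option (List Int)
  | [], _, _ => some []
  | ch :: rest, lower_label, idx =>
      let found := PySem.Chars.findFrom lower_label [ch] idx
      if found = -1 then none
      else
        match scanB rest lower_label (found + 1) with
        | none => none
        | some ps => some (found :: ps)

def coalesceB : Int → Int → List Int → List (Int × Int)
  | start, length, [] => [(start, length)]
  | start, length, p :: ps =>
      if p = start + length then coalesceB start (length + 1) ps
      else (start, length) :: coalesceB p 1 ps

def coalesceTop : List Int → List (Int × Int)
  | [] => []
  | p :: ps => coalesceB p 1 ps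

-- A's in-loop merging with accumulated last range (s, l) equals scan-then-coalesce from state (s, l).
theorem loopA_eq_scan_coalesce (lp : List Char) : ∀ (ll : List Char) (idx : Int)
    (rs : List (Int × Int)) (s l : Int),
    loopA lp ll (rs ++ [(s, l)]) idx =
      match scanB lp ll idx with
      | none => []
      | some ps => rs ++ coalesceB s l ps := by
  induction lp with
  | nil => intro ll idx rs s l; simp [loopA, scanB, coalesceB]
  | cons ch rest ih =>
      intro ll idx rs s l
      simp only [loopA, scanB]
      by_cases hfound : PySem.Chars.findFrom ll [ch] idx = -1
      · simp [hfound]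
      · simp only [if_neg hfound]
        have hlast : (rs ++ [(s, l)]).getLast? = some (s, l) := by simp
        have hdrop : (rs ++ [(s, l)]).dropLast = rs := by simp
        simp only [hlast]
        by_cases hc : s + l = PySem.Chars.findFrom ll [ch] idx
        · rw [if_pos hc, hdrop, ih]
          cases scanB rest ll (PySem.Chars.findFrom ll [ch] idx + 1) with
          | none => rfl
          | some ps => simp [coalesceB, ← hc]
        · rw [if_neg hc, ih]
          cases scanB rest ll (PySem.Chars.findFrom ll [ch] idx + 1) with
          | none => rfl
          | some ps =>
              simp only [coalesceB]
              rw [if_neg (fun h => hc h.symm), List.append_assoc]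
              rfl

-- if sub occurs at the front, find points at index 0
theorem find_eq_zero_of_prefix (s sub : List Char) (h : sub <+: s) :
    PySem.Chars.find s sub = 0 := by
  have hnn : 0 ≤ PySem.Chars.find s sub := by
    rw [PySem.Chars.find_nonneg_iff]; exact h.isInfix
  obtain ⟨h1, h2⟩ := PySem.Chars.find_spec hnn
  by_contra hne
  have hpos : 0 < (PySem.Chars.find s sub).toNat := by omega
  exact h2 0 hpos (by simpa using h)

-- find of a single char on a cons whose head does not match
theorem find_cons_ne (ch c : Char) (rest : List Char) (hne : ch ≠ c) :
    PySem.Chars.find (ch :: rest) [c] =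
      if PySem.Chars.find rest [c] = -1 then -1 else 1 + PySem.Chars.find rest [c] := by
  by_cases hrest : PySem.Chars.find rest [c] = -1
  · rw [if_pos hrest, PySem.Chars.find_eq_neg_one_iff] at *
    intro hinfix
    rcases List.infix_cons_iff.mp hinfix with hp | hi
    · exact hne (List.cons_prefix_cons.mp hp).1.symm
    · exact hrest hi
  · rw [if_neg hrest]
    have hf0 : 0 ≤ PySem.Chars.find rest [c] := by
      have := PySem.Chars.neg_one_le_find rest [c]; omega
    obtain ⟨hfp, hfmin⟩ := PySem.Chars.find_spec hf0
    have hg0 : 0 ≤ PySem.Chars.find (ch :: rest) [c] := by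
      rw [PySem.Chars.find_nonneg_iff]
      exact List.infix_cons_iff.mpr (Or.inr ((PySem.Chars.find_nonneg_iff _ _).mp hf0))
    obtain ⟨hgp, hgmin⟩ := PySem.Chars.find_spec hg0
    have hgne : (PySem.Chars.find (ch :: rest) [c]).toNat ≠ 0 := by
      intro h0
      rw [h0] at hgp
      simp only [List.drop_zero] at hgp
      exact hne (List.cons_prefix_cons.mp hgp).1.symm
    obtain ⟨j, hj⟩ : ∃ j, (PySem.Chars.find (ch :: rest) [c]).toNat = j + 1 :=
      ⟨(PySem.Chars.find (ch :: rest) [c]).toNat - 1, by omega⟩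
    have hgp' : [c] <+: rest.drop j := by rw [hj] at hgp; simpa using hgp
    have h1 : (PySem.Chars.find rest [c]).toNat ≤ j := by
      by_contra h; push_neg at h; exact hfmin j h hgp'
    have h2 : (PySem.Chars.find (ch :: rest) [c]).toNat ≤ (PySem.Chars.find rest [c]).toNat + 1 := by
      by_contra h; push_neg at h
      exact hgmin ((PySem.Chars.find rest [c]).toNat + 1) (by omega) (by simpa using hfp)
    omega

-- findFrom at an index where the label has the char: it is found right there
theorem findFrom_here (ll : List Char) (c : Char) (rest : List Char) (k : Nat)
    (hk : k ≤ ll.length) (hd : ll.drop k = c :: rest) :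
    PySem.Chars.findFrom ll [c] (k : Int) = (k : Int) := by
  rw [PySem.Chars.findFrom_natCast ll [c] k hk, hd,
    find_eq_zero_of_prefix (c :: rest) [c] ⟨rest, rfl⟩]
  simp

-- findFrom skips an index where the label char differs
theorem findFrom_skip (ll : List Char) (c ch : Char) (rest : List Char) (k : Nat)
    (hne : ch ≠ c) (hd : ll.drop k = ch :: rest) (hk : k < ll.length) :
    PySem.Chars.findFrom ll [c] (k : Int) = PySem.Chars.findFrom ll [c] ((k + 1 : Nat) : Int) := by
  have hd1 : ll.drop (k + 1) = rest := by
    rw [← List.drop_drop, hd]; rfl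
  rw [PySem.Chars.findFrom_natCast ll [c] k (by omega),
    PySem.Chars.findFrom_natCast ll [c] (k + 1) (by omega), hd, hd1,
    find_cons_ne ch c rest hne]
  by_cases h : PySem.Chars.find rest [c] = -1
  · simp [h]
  · rw [if_neg h]
    have : ¬ ((1 : Int) + PySem.Chars.find rest [c] = -1) := by
      have := PySem.Chars.neg_one_le_find rest [c]; omega
    rw [if_neg this, if_neg h]
    push_cast; ring

-- the head of a successful greedy scan is at or past the starting index
theorem scanB_head_ge (c : Char) (lpr ll : List Char) (j : Nat) (hj : j ≤ ll.length)
    (p : Int) (ps : List Int) (h : scanB (c :: lpr) ll (j : Int) = some (p :: ps)) :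
    (j : Int) ≤ p := by
  simp only [scanB] at h
  by_cases hf : PySem.Chars.findFrom ll [c] (j : Int) = -1
  · simp [hf] at h
  · simp only [if_neg hf] at h
    have hspec := (PySem.Chars.findFrom_natCast_spec ll [c] j hj hf).1
    cases hs : scanB lpr ll (PySem.Chars.findFrom ll [c] (j : Int) + 1) with
    | none => rw [hs] at h; simp at h
    | some qs =>
        rw [hs] at h
        simp only [Option.some.injEq, List.cons.injEq] at h
        rw [← h.1]; exact hspec

-- splitting off a range that cannot be merged
theorem coalesceB_ne (s r p : Int) (ps : List Int) (h : p ≠ s + r) :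
    coalesceB s r (p :: ps) = (s, r) :: coalesceB p 1 ps := by
  simp [coalesceB, h]

-- once the prefix is exhausted and the run flushed, B's walk changes nothing
theorem loopB_done : ∀ (lsuf : List Char) (i : Int) (ranges : List (Int × Int)) (s : Int),
    finB (loopB lsuf i [] ranges s 0) = ranges := by
  intro lsuf
  induction lsuf with
  | nil => intro i ranges s; simp [loopB, finB]
  | cons ch rest ih => intro i ranges s; simp only [loopB]; rw [if_neg (by simp)]; exact ih _ _ _

-- main correspondence: B's walk over the label suffix equals greedy-scan-then-coalesce
theorem loopB_eq (ll : List Char) : ∀ (lsuf : List Char) (k : Nat) (lpr : List Char)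
    (ranges : List (Int × Int)) (s r : Int),
    lsuf = ll.drop k → k ≤ ll.length → 0 ≤ r → (r ≠ 0 → s + r = (k : Int)) →
    finB (loopB lsuf (k : Int) lpr ranges s r) =
      match scanB lpr ll (k : Int) with
      | none => []
      | some ps => ranges ++ (if r = 0 then coalesceTop ps else coalesceB s r ps) := by
  intro lsuf
  induction lsuf with
  | nil =>
      intro k lpr ranges s r hdrop hk _ _
      match lpr with
      | [] =>
          simp only [loopB, scanB, finB]
          by_cases hr : r = 0 <;> simp [hr, coalesceTop, coalesceB]
      | c :: lpr' =>
          have hfind : PySem.Chars.findFrom ll [c] (k : Int) = -1 := by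
            rw [PySem.Chars.findFrom_natCast ll [c] k hk, ← hdrop]
            have : PySem.Chars.find ([] : List Char) [c] = -1 := by
              rw [PySem.Chars.find_eq_neg_one_iff]
              intro hinf
              have := hinf.length_le
              simp at this
            simp [this]
          simp [loopB, scanB, hfind, finB]
  | cons ch rest ih =>
      intro k lpr ranges s r hdrop hk hr0 hinv
      have hklt : k < ll.length := by
        by_contra h
        rw [List.drop_eq_nil_of_le (by omega)] at hdrop
        exact List.cons_ne_nil _ _ hdrop
      have hd1 : rest = ll.drop (k + 1) := by
        rw [← List.drop_drop, ← hdrop]; rfl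
      have hcast : (k : Int) + 1 = ((k + 1 : Nat) : Int) := by push_cast; ring
      match lpr with
      | [] =>
          simp only [loopB]
          have hres : finB (loopB rest ((k : Int) + 1) []
              (if r ≠ 0 then ranges ++ [(s, r)] else ranges) s 0) =
              (if r ≠ 0 then ranges ++ [(s, r)] else ranges) := by
            by_cases hr : r ≠ 0 <;> simp only [hr, if_true, if_false, loopB_done]
          by_cases hr : r = 0
          · rw [if_neg (by simpa using hr)]
            have := loopB_done rest ((k : Int) + 1) ranges s
            rw [this]
            simp [scanB, hr, coalesceTop]
          · rw [if_pos hr, loopB_done]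
            simp [scanB, hr, coalesceB]
      | c :: lpr' =>
          by_cases hch : ch = c
          · -- match: position k is taken
            subst hch
            have hfind : PySem.Chars.findFrom ll [ch] (k : Int) = (k : Int) :=
              findFrom_here ll ch rest k (by omega) hdrop.symm
            simp only [loopB, reduceIte]
            have hIH := ih (k + 1) lpr' ranges (if r = 0 then (k : Int) else s) (r + 1)
              hd1 (by omega) (by omega)
              (by intro _
                  by_cases hr : r = 0
                  · rw [if_pos hr, hr]; push_cast; ring
                  · rw [if_neg hr]; have := hinv hr; push_cast; omega)
            have hscan2 : scanB (ch :: lpr') ll (k : Int) =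
                match scanB lpr' ll ((k : Int) + 1) with
                | none => none
                | some ps => some ((k : Int) :: ps) := by
              simp only [scanB, hfind]
              rw [if_neg (show ¬((k : Int) = -1) by omega)]
            rw [hscan2, hcast, hIH]
            cases hs : scanB lpr' ll ((k + 1 : Nat) : Int) with
            | none => simp only [hs]
            | some ps =>
                simp only [hs]
                by_cases hr : r = 0
                · subst hr
                  simp [coalesceTop]
                · have hk' := hinv hr
                  simp only [if_neg hr, if_neg (show ¬(r + 1 = 0) by omega)]
                  simp only [coalesceB]
                  rw [if_pos hk'.symm]
          · -- mismatch: run flushes (or stays empty); scanB skips index k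
            have hskip : PySem.Chars.findFrom ll [c] (k : Int) =
                PySem.Chars.findFrom ll [c] ((k + 1 : Nat) : Int) :=
              findFrom_skip ll c ch rest k hch hdrop.symm hklt
            have hscan : scanB (c :: lpr') ll (k : Int) = scanB (c :: lpr') ll ((k + 1 : Nat) : Int) := by
              simp only [scanB, hskip]
            simp only [loopB, if_neg hch]
            by_cases hr : r = 0
            · rw [if_neg (by simpa using hr)]
              have hIH := ih (k + 1) (c :: lpr') ranges s 0 hd1 (by omega) (by omega) (by simp)
              rw [hcast, hIH, hscan]
              cases scanB (c :: lpr') ll ((k + 1 : Nat) : Int) with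
              | none => rfl
              | some ps => simp [hr]
            · rw [if_pos (by simpa using hr)]
              have hIH := ih (k + 1) (c :: lpr') (ranges ++ [(s, r)]) s 0 hd1 (by omega) (by omega) (by simp)
              rw [hcast, hIH, hscan]
              cases hs : scanB (c :: lpr') ll ((k + 1 : Nat) : Int) with
              | none => rfl
              | some ps =>
                  simp only [if_pos rfl, if_neg hr, List.append_assoc]
                  congr 1
                  match ps, hs with
                  | [], _ => simp [coalesceTop, coalesceB]
                  | p :: ps', hs =>
                      have hge := scanB_head_ge c lpr' ll (k + 1) (by omega) p ps' hs
                      have hpk : p ≠ s + r := by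
                        have := hinv hr; omega
                      rw [coalesceB_ne s r p ps' hpk]
                      simp [coalesceTop]

-- the list k, k+1, …, k+n as a cons
theorem consec_map (k n : Nat) :
    (List.range (n + 1)).map (fun i => ((k + i : Nat) : Int))
      = ((k : Nat) : Int) :: (List.range n).map (fun i => ((k + 1 + i : Nat) : Int)) := by
  rw [List.range_succ_eq_map, List.map_cons, List.map_map]
  have h1 : ((k + 0 : Nat) : Int) = ((k : Nat) : Int) := by simp
  have h2 : (List.range n).map ((fun i : Nat => ((k + i : Nat) : Int)) ∘ Nat.succ)
      = (List.range n).map (fun i : Nat => ((k + 1 + i : Nat) : Int)) :=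
    List.map_congr_left (fun a _ => by
      simp only [Function.comp_apply, Nat.succ_eq_add_one]; push_cast; ring)
  rw [h1, h2]

-- greedy scan of a prefix occurring at position k yields the consecutive indices k, k+1, …
theorem scanB_of_prefix (lp : List Char) : ∀ (ll : List Char) (k : Nat),
    k + lp.length ≤ ll.length → lp <+: ll.drop k →
    scanB lp ll (k : Int) = some ((List.range lp.length).map (fun i => ((k + i : Nat) : Int))) := by
  induction lp with
  | nil => intro ll k _ _; simp [scanB]
  | cons ch rest ih =>
      intro ll k hlen hpre
      have hch : [ch] <+: ll.drop k := by
        obtain ⟨t, ht⟩ := hpre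
        exact ⟨rest ++ t, by simpa using ht⟩
      have hk : k ≤ ll.length := by simp only [List.length_cons] at hlen; omega
      have hfind : PySem.Chars.find (ll.drop k) [ch] = 0 := find_eq_zero_of_prefix _ _ hch
      have hff : PySem.Chars.findFrom ll [ch] (k : Int) = (k : Int) := by
        rw [PySem.Chars.findFrom_natCast ll [ch] k hk, hfind]
        simp
      have hrest : rest <+: ll.drop (k + 1) := by
        obtain ⟨t, ht⟩ := hpre
        have hdd : ll.drop (k + 1) = (ll.drop k).drop 1 := by rw [List.drop_drop]
        rw [hdd, ← ht]
        exact ⟨t, by simp⟩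
      simp only [scanB, hff]
      rw [if_neg (by omega)]
      have hcast : ((k : Int) + 1) = ((k + 1 : Nat) : Int) := by push_cast; ring
      rw [hcast, ih ll (k + 1) (by simp only [List.length_cons] at hlen; omega) hrest]
      rw [List.length_cons, consec_map k rest.length]

-- coalescing a run of consecutive positions extends the current range
theorem coalesceB_consecutive (n : Nat) : ∀ (s l : Int),
    coalesceB s l ((List.range n).map (fun i : Nat => s + l + (i : Int))) = [(s, l + (n : Int))] := by
  induction n with
  | zero => intro s l; simp [coalesceB]
  | succ m ih =>
      intro s l
      rw [List.range_succ_eq_map, List.map_cons, List.map_map]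
      simp only [coalesceB]
      rw [if_pos (by push_cast; ring)]
      have hmap : (List.range m).map ((fun i : Nat => s + l + (i : Int)) ∘ Nat.succ)
           = (List.range m).map (fun i : Nat => s + (l + 1) + (i : Int)) := by
        apply List.map_congr_left; intro i _
        simp only [Function.comp_apply, Nat.succ_eq_add_one]
        push_cast; ring
      rw [hmap, ih s (l + 1)]
      have hc2 : l + 1 + (m : Int) = l + ((m + 1 : Nat) : Int) := by push_cast; ring
      rw [hc2]

-- ===== VERDICT (by name: the statement is the Claim_ definition above) =====
theorem compute_match_ranges_spec : Claim_equal_compute_match_ranges := by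
  intro label prefix_ _
  unfold Spec_compute_match_ranges compute_match_ranges compute_match_ranges_alt
  by_cases hp : prefix_.toList = []
  · rw [if_pos hp, if_pos (Or.inl hp)]
  · rw [if_neg hp]
    by_cases hl : label.toList = []
    · rw [if_pos hl, if_pos (Or.inr hl)]
    · rw [if_neg hl, if_neg (by tauto : ¬(prefix_.toList = [] ∨ label.toList = []))]
      have hlpne : PySem.Chars.lower prefix_.toList ≠ [] := by
        simp [PySem.Chars.lower, hp]
      -- B's side equals the scan-then-coalesce view
      have hB := loopB_eq (PySem.Chars.lower label.toList) (PySem.Chars.lower label.toList) 0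
        (PySem.Chars.lower prefix_.toList) [] 0 0 rfl (by omega) le_rfl (by simp)
      simp only [Nat.cast_zero, List.nil_append, reduceIte] at hB
      rw [hB]
      by_cases hsw : PySem.Chars.startswith (PySem.Chars.lower label.toList) (PySem.Chars.lower prefix_.toList) = true
      · -- prefix case: the scan yields 0,1,…,n-1 and the coalescer rebuilds [(0, n)]
        rw [if_pos hsw]
        have hpre := (PySem.Chars.startswith_iff _ _).mp hsw
        have hlen : 0 + (PySem.Chars.lower prefix_.toList).length ≤ (PySem.Chars.lower label.toList).length := by
          simpa using hpre.length_le
        have hscan := scanB_of_prefix (PySem.Chars.lower prefix_.toList) (PySem.Chars.lower label.toList) 0 hlen (by simpa using hpre)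
        obtain ⟨m, hm⟩ : ∃ m, (PySem.Chars.lower prefix_.toList).length = m + 1 := by
          cases h : PySem.Chars.lower prefix_.toList with
          | nil => exact absurd h hlpne
          | cons a b => exact ⟨b.length, rfl⟩
        rw [hm, consec_map 0 m] at hscan
        simp only [Nat.cast_zero] at hscan
        rw [hscan]
        simp only [coalesceTop]
        have hmap : (List.range m).map (fun i : Nat => ((0 + 1 + i : Nat) : Int))
            = (List.range m).map (fun i : Nat => (0 : Int) + 1 + (i : Int)) := by
          apply List.map_congr_left; intro i _; push_cast; ring
        rw [hmap, coalesceB_consecutive m 0 1]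
        have hn : prefix_.toList.length = m + 1 := by
          rw [← hm]; simp [PySem.Chars.lower]
        rw [hn]
        have hc3 : ((m + 1 : Nat) : Int) = 1 + (m : Int) := by push_cast; ring
        rw [hc3]
      · -- subsequence case: A's loop from empty ranges equals scan-then-coalesce
        rw [if_neg hsw]
        obtain ⟨ch, rest, hlpe⟩ : ∃ ch rest, PySem.Chars.lower prefix_.toList = ch :: rest := by
          cases h : PySem.Chars.lower prefix_.toList with
          | nil => exact absurd h hlpne
          | cons a b => exact ⟨a, b, rfl⟩
        rw [hlpe]
        simp only [loopA, scanB]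
        by_cases hf : PySem.Chars.findFrom (PySem.Chars.lower label.toList) [ch] 0 = -1
        · simp [hf]
        · simp only [if_neg hf, List.getLast?_nil, List.nil_append]
          have hmain := loopA_eq_scan_coalesce rest (PySem.Chars.lower label.toList)
            (PySem.Chars.findFrom (PySem.Chars.lower label.toList) [ch] 0 + 1)
            [] (PySem.Chars.findFrom (PySem.Chars.lower label.toList) [ch] 0) 1
          simp only [List.nil_append] at hmain
          rw [hmain]
          cases scanB rest (PySem.Chars.lower label.toList) (PySem.Chars.findFrom (PySem.Chars.lower label.toList) [ch] 0 + 1) with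
          | none => rfl
          | some ps => simp [coalesceTop]
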